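-- pv_equiv track=rewrite | github.com/Yun04kaGasai/Bifithon | tools/bifc.py | expr_has_division
-- ===== SOURCE A (Python) =====
-- def expr_has_division(expr: str) -> bool:
--     in_string = False
--     string_char = ""
--     escaped = False
--
--     for ch in expr:
--         if in_string:
--             if escaped:
--                 escaped = False
--             elif ch == "\\":
--                 escaped = True
--             elif ch == string_char:
--                 in_string = False
--             continue
--
--         if ch in ("\"", "'"):
--             in_string = True
--             string_char = ch
--             continue
--
--         if ch == "/":
--             return True
--
--     return False
-- ===== SOURCE B (Python) =====
-- def expr_has_division(expr: str) -> bool: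
--     pos = 0
--     while True:
--         slash = expr.find("/", pos)
--         dq = expr.find('"', pos)
--         sq = expr.find("'", pos)
--         if dq == -1:
--             q = sq
--         elif sq == -1:
--             q = dq
--         else:
--             q = min(dq, sq)
--         if q == -1:
--             return slash != -1
--         if slash != -1 and slash < q:
--             return True
--         # skip the string literal opened at q: jump to closing-quote candidates,
--         # a candidate preceded by an odd run of backslashes is escaped
--         quote = expr[q]
--         j = q + 1
--         while True:
--             k = expr.find(quote, j)
--             if k == -1:
--                 return False
--             b = 0
--             while k - 1 - b >= 0 and expr[k - 1 - b] == "\\":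
--                 b += 1
--             if b % 2 == 0:
--                 pos = k + 1
--                 break
--             j = k + 1
-- ===== Notes on version B (the rewrite author's own statement) =====
-- stated objective: faster
-- what changed: Replaces A's per-character escape/quote state machine by a jump-based scanner: str.find locates the next division character and the next quote, literals are skipped by jumping between closing-quote candidates, and an escaped candidate is recognised by the parity of the backslash run immediately before it.
import Mathlib
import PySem

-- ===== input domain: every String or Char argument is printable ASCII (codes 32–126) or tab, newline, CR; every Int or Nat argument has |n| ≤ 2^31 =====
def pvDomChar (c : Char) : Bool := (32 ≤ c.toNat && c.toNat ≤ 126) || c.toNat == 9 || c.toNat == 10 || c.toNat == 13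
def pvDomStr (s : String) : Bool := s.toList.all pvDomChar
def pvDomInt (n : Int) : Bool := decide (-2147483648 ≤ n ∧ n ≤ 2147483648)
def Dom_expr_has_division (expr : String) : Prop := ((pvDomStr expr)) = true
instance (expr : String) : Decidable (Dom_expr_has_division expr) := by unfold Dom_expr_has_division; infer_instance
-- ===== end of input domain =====

-- B replaces A's per-character escape/quote state machine by a jump-based scanner:
-- str.find jumps to the next division / quote / closing-quote candidate, and an
-- escaped closing quote is recognised by the parity of the backslash run before it
-- (objective: faster by a constant factor — find runs at C speed; measured by the
-- timing run).


-- ===== PORT A =====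
-- A's for-loop over the characters with state (in_string, string_char, escaped);
-- string_char starts as Python's "" which is never consulted while in_string is
-- False, so it is initialised with an arbitrary Char (' ').
def aLoop : List Char → Bool → Char → Bool → Bool
  | [], _, _, _ => false
  | ch :: rest, inS, sc, esc =>
    if inS then
      if esc then aLoop rest inS sc false
      else if ch = '\\' then aLoop rest inS sc true
      else if ch = sc then aLoop rest false sc esc
      else aLoop rest inS sc esc
    else if ch = '"' ∨ ch = '\'' then aLoop rest true ch esc
    else if ch = '/' then true
    else aLoop rest inS sc esc

def expr_has_division (expr : String) : Bool :=
  aLoop expr.toList false ' ' false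

-- ===== PORT B =====
-- Source B's backslash-counting loop: b increments while expr[k-1-b] is a backslash
-- (the k-1-b ≥ 0 bound is python's own loop guard).
def bCount (expr : List Char) (k : Nat) (b : Nat) : Nat :=
  if b + 1 ≤ k ∧ expr[k - 1 - b]? = some '\\' then bCount expr k (b + 1) else b
termination_by k - b

-- Source B's two nested while-loops, as mutual fuel recursion (each iteration moves the
-- scan position strictly right, so fuel length+2 is enough; fuel is only a
-- totality device).
mutual
def bOuter (expr : List Char) (pos : Nat) : Nat → Bool
  | 0 => false
  | fuel + 1 =>
    let slash := PySem.Chars.findFrom expr ['/'] (pos : Int) none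
    let dq := PySem.Chars.findFrom expr ['"'] (pos : Int) none
    let sq := PySem.Chars.findFrom expr ['\''] (pos : Int) none
    let q : Int := if dq = -1 then sq else if sq = -1 then dq else min dq sq
    if q = -1 then slash ≠ -1
    else if slash ≠ -1 ∧ slash < q then true
    else
      match expr[q.toNat]? with
      | none => false   -- unreachable: q is an index found in expr
      | some quote => bInner expr quote (q.toNat + 1) fuel

def bInner (expr : List Char) (quote : Char) (j : Nat) : Nat → Bool
  | 0 => false
  | fuel + 1 =>
    let k := PySem.Chars.findFrom expr [quote] (j : Int) none
    if k = -1 then false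
    else
      let b := bCount expr k.toNat 0
      if b % 2 = 0 then bOuter expr (k.toNat + 1) fuel
      else bInner expr quote (k.toNat + 1) fuel
end

def expr_has_division_alt (expr : String) : Bool :=
  bOuter expr.toList 0 (expr.toList.length + 2)

-- ===== PRECONDITION & SPEC =====
def Spec_expr_has_division (expr : String) (out : Bool) : Prop := out = expr_has_division_alt expr
instance (expr : String) (out : Bool) : Decidable (Spec_expr_has_division expr out) := by unfold Spec_expr_has_division; infer_instance

-- ===== CLAIM (what is proved, stated in full; the proofs are below) =====
def Claim_equal_expr_has_division : Prop := ∀ (expr : String), Dom_expr_has_division expr → Spec_expr_has_division expr (expr_has_division expr)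

-- ===== LEMMAS AND PROOFS =====

-- small getElem? helpers
theorem getSome_lt {l : List Char} {m : Nat} {c : Char} (h : l[m]? = some c) : m < l.length := by
  rw [List.getElem?_eq_some_iff] at h; exact h.1

theorem mem_of_getSome {l : List Char} {m : Nat} {c : Char} (h : l[m]? = some c) : c ∈ l := by
  rw [List.getElem?_eq_some_iff] at h
  obtain ⟨h1, h2⟩ := h
  exact h2 ▸ List.getElem_mem _

theorem decomp_at {l : List Char} {m : Nat} {c : Char} (h : l[m]? = some c) :
    l = l.take m ++ c :: l.drop (m + 1) := by
  have hm := getSome_lt h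
  conv_lhs => rw [← List.take_append_drop m l]
  congr 1
  rw [List.drop_eq_getElem_cons hm]
  congr 1
  rw [List.getElem?_eq_getElem hm] at h
  exact (Option.some.injEq _ _).mp h

-- characters that matter outside a string literal
def Specialless (u : List Char) : Prop := ∀ x ∈ u, x ≠ '/' ∧ x ≠ '"' ∧ x ≠ '\''

theorem specialless_take {l : List Char} {n : Nat}
    (h1 : ∀ i, i < n → l[i]? ≠ some '/') (h2 : ∀ i, i < n → l[i]? ≠ some '"')
    (h3 : ∀ i, i < n → l[i]? ≠ some '\'') : Specialless (l.take n) := by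
  intro x hx
  rw [List.mem_take_iff_getElem] at hx
  obtain ⟨i, hi, rfl⟩ := hx
  have hg := List.getElem?_eq_getElem (by omega : i < l.length)
  exact ⟨fun hc => h1 i (by omega) (by rw [hg, hc]),
         fun hc => h2 i (by omega) (by rw [hg, hc]),
         fun hc => h3 i (by omega) (by rw [hg, hc])⟩

theorem aLoop_skip (u v : List Char) (sc : Char) (hu : Specialless u) :
    aLoop (u ++ v) false sc false = aLoop v false sc false := by
  induction u with
  | nil => rfl
  | cons a r ih =>
    have ha := hu a (by simp)
    have hr : Specialless r := fun x hx => hu x (by simp [hx])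
    simp only [List.cons_append, aLoop]
    have hq : ¬ (a = '"' ∨ a = '\'') := by tauto
    simp [hq, ha.1, ih hr]

theorem aLoop_no_special (l : List Char) (sc : Char) (hl : Specialless l) :
    aLoop l false sc false = false := by
  have := aLoop_skip l [] sc hl
  simpa using this

theorem aLoop_hit_slash {l : List Char} {n : Nat} (sc : Char)
    (h : l[n]? = some '/') (hs : Specialless (l.take n)) :
    aLoop l false sc false = true := by
  conv_lhs => rw [decomp_at h]
  rw [aLoop_skip _ _ _ hs]
  simp [aLoop]

theorem aLoop_hit_quote {l : List Char} {m : Nat} {qc : Char} (sc : Char)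
    (hqc : qc = '"' ∨ qc = '\'') (h : l[m]? = some qc) (hs : Specialless (l.take m)) :
    aLoop l false sc false = aLoop (l.drop (m + 1)) true qc false := by
  conv_lhs => rw [decomp_at h]
  rw [aLoop_skip _ _ _ hs]
  simp [aLoop, hqc]

theorem aLoop_no_close (l : List Char) (c : Char) (hc : c ∉ l) :
    ∀ esc, aLoop l true c esc = false := by
  induction l with
  | nil => intro esc; rfl
  | cons a r ih =>
    intro esc
    have hac : a ≠ c := fun h => hc (by simp [h])
    have hr : c ∉ r := fun h => hc (by simp [h])
    by_cases he : esc
    · simp [aLoop, he, ih hr]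
    · by_cases hb : a = '\\' <;> simp [aLoop, he, hb, hac, ih hr]

-- A's escape state after scanning a chunk inside a literal
def escAfter : List Char → Bool → Bool
  | [], e => e
  | a :: r, e => escAfter r (if e then false else decide (a = '\\'))

theorem escAfter_append (u v : List Char) (e : Bool) :
    escAfter (u ++ v) e = escAfter v (escAfter u e) := by
  induction u generalizing e with
  | nil => rfl
  | cons a r ih => simp [escAfter, ih]

theorem aLoop_chunk (u : List Char) (c : Char) (hc : c ∉ u) :
    ∀ esc v, aLoop (u ++ v) true c esc = aLoop v true c (escAfter u esc) := by
  induction u with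
  | nil => intro esc v; rfl
  | cons a r ih =>
    intro esc v
    have hac : a ≠ c := fun h => hc (by simp [h])
    have hr : c ∉ r := fun h => hc (by simp [h])
    by_cases he : esc
    · simp [aLoop, he, escAfter, ih hr]
    · by_cases hb : a = '\\' <;> simp [aLoop, he, hb, hac, escAfter, ih hr]

-- length of the leading backslash run
def bsRun : List Char → Nat
  | [] => 0
  | a :: r => if a = '\\' then bsRun r + 1 else 0

theorem escAfter_parity (u : List Char) :
    escAfter u false = decide (bsRun u.reverse % 2 = 1) := by
  induction u using List.reverseRecOn with
  | nil => simp [escAfter, bsRun]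
  | append_singleton r x ih =>
    rw [escAfter_append, ih]
    by_cases hb : x = '\\'
    · by_cases hp : bsRun r.reverse % 2 = 1 <;>
        simp [escAfter, hb, List.reverse_append, bsRun, hp] <;> omega
    · simp [escAfter, hb, List.reverse_append, bsRun]

theorem bsRun_eq (l : List Char) : ∀ b, (∀ i, i < b → l[i]? = some '\\') →
    l[b]? ≠ some '\\' → bsRun l = b := by
  induction l with
  | nil =>
    intro b hall _
    cases b with
    | zero => rfl
    | succ m => exact absurd (hall 0 (by omega)) (by simp)
  | cons a r ih =>
    intro b hall hstop
    cases b with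
    | zero =>
      have : a ≠ '\\' := fun h => hstop (by simp [h])
      simp [bsRun, this]
    | succ m =>
      have ha : a = '\\' := by
        have := hall 0 (by omega)
        simpa using this
      have hr := ih m (fun i hi => by simpa using hall (i + 1) (by omega))
        (by simpa using hstop)
      simp [bsRun, ha, hr]

theorem bCount_eq_bsRun (expr : List Char) (k : Nat) (hk : k ≤ expr.length) :
    ∀ (fuel b : Nat), k - b ≤ fuel → b ≤ k → (∀ s, s < b → expr[k - 1 - s]? = some '\\') →
      bCount expr k b = bsRun ((expr.take k).reverse) := by
  have hlen : ((expr.take k).reverse).length = k := by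
    simp [Nat.min_eq_left hk]
  have hgetrev : ∀ i, i < k → ((expr.take k).reverse)[i]? = expr[k - 1 - i]? := by
    intro i hi
    have hl2 : (expr.take k).length = k := by rw [List.length_take, Nat.min_eq_left hk]
    rw [List.getElem?_reverse (by rw [hl2]; omega)]
    rw [hl2, List.getElem?_take, if_pos (by omega)]
  intro fuel
  induction fuel with
  | zero =>
    intro b hfb hbk hpre
    have hbe : b = k := by omega
    subst hbe
    rw [bCount, if_neg (fun h => absurd h.1 (by omega))]
    symm
    apply bsRun_eq _ b
    · intro i hi
      rw [hgetrev i (by omega)]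
      exact hpre i hi
    · rw [List.getElem?_eq_none_iff.mpr (by omega)]
      simp
  | succ m ih =>
    intro b hfb hbk hpre
    by_cases hc : b + 1 ≤ k ∧ expr[k - 1 - b]? = some '\\'
    · rw [bCount, if_pos hc]
      exact ih (b + 1) (by omega) (by omega)
        (fun s hs => by
          by_cases hsb : s = b
          · subst hsb; exact hc.2
          · exact hpre s (by omega))
    · rw [bCount, if_neg hc]
      symm
      apply bsRun_eq _ b
      · intro i hi
        rw [hgetrev i (by omega)]
        exact hpre i hi
      · by_cases hbk2 : b < k
        · rw [hgetrev b (by omega)]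
          intro hcon
          exact hc ⟨by omega, hcon⟩
        · rw [List.getElem?_eq_none_iff.mpr (by omega)]
          simp

-- first-occurrence characterisation of Python's find for a single character
theorem single_infix_iff (c : Char) (l : List Char) : [c] <:+: l ↔ c ∈ l := by
  constructor
  · intro h; exact h.mem (by simp)
  · intro h
    obtain ⟨s, t, hst⟩ := List.append_of_mem h
    exact ⟨s, t, by simp [hst]⟩

theorem find_single_neg (c : Char) (l : List Char) (h : c ∉ l) :
    PySem.Chars.find l [c] = -1 := by
  rw [PySem.Chars.find_eq_neg_one_iff, single_infix_iff]
  exact h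

theorem find_single_pos (c : Char) (l : List Char) (h : c ∈ l) :
    0 ≤ PySem.Chars.find l [c] ∧
    l[(PySem.Chars.find l [c]).toNat]? = some c ∧
    (∀ i, i < (PySem.Chars.find l [c]).toNat → l[i]? ≠ some c) := by
  have h0 : 0 ≤ PySem.Chars.find l [c] := by
    rw [PySem.Chars.find_nonneg_iff, single_infix_iff]; exact h
  obtain ⟨h1, h2⟩ := PySem.Chars.find_spec (s := l) (sub := [c]) h0
  have hpref : ∀ (m : Nat), [c] <+: l.drop m ↔ l[m]? = some c := by
    intro m
    rw [← List.head?_drop]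
    constructor
    · intro hp
      obtain ⟨t, ht⟩ := hp
      rw [← ht]; rfl
    · intro hh
      rw [List.head?_eq_some_iff] at hh
      obtain ⟨ys, hys⟩ := hh
      exact ⟨ys, by simp [hys]⟩
  refine ⟨h0, (hpref _).mp h1, fun i hi => ?_⟩
  intro hcon
  exact h2 i hi ((hpref i).mpr hcon)

-- findFrom from a Nat start, rephrased on the dropped suffix
theorem findFrom_single (expr : List Char) (c : Char) (p : Nat) (hp : p ≤ expr.length) :
    PySem.Chars.findFrom expr [c] (p : Int) none =
      if PySem.Chars.find (expr.drop p) [c] = -1 then -1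
      else (p : Int) + PySem.Chars.find (expr.drop p) [c] :=
  PySem.Chars.findFrom_natCast expr [c] p hp

-- the main invariant: B's outer loop = A outside a literal, B's inner loop = A inside
theorem PQ (expr : List Char) : ∀ f,
    (∀ pos sc, pos ≤ expr.length → expr.length < pos + f →
      bOuter expr pos f = aLoop (expr.drop pos) false sc false) ∧
    (∀ c j, c ≠ '\\' → 1 ≤ j → j ≤ expr.length → expr.length < j + f →
      expr[j - 1]? = some c →
      bInner expr c j f = aLoop (expr.drop j) true c false) := by
  intro f
  induction f with
  | zero => exact ⟨fun pos sc h1 h2 => by omega, fun c j _ _ h1 h2 _ => by omega⟩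
  | succ f ih =>
    obtain ⟨ihP, ihQ⟩ := ih
    constructor
    · -- outer loop step
      intro pos sc hpos hfuel
      set l := expr.drop pos with hl
      have hllen : l.length = expr.length - pos := by simp [hl]
      have hget : ∀ i, l[i]? = expr[pos + i]? := by
        intro i; simp [hl, List.getElem?_drop]
      rw [bOuter]
      simp only [findFrom_single expr _ pos hpos, ← hl]
      set s := PySem.Chars.find l ['/'] with hs
      set d := PySem.Chars.find l ['"'] with hd
      set a := PySem.Chars.find l ['\''] with ha
      -- shared continuation once the first quote (at relative index m) is identified
      have hquote : ∀ (m : Nat) (qc : Char), (qc = '"' ∨ qc = '\'') →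
          l[m]? = some qc → Specialless (l.take m) →
          bInner expr qc (pos + m + 1) f = aLoop l false sc false := by
        intro m qc hqc hm hspec
        have hmlen : m < l.length := getSome_lt hm
        have hA := aLoop_hit_quote sc hqc hm hspec
        have hdropm : l.drop (m + 1) = expr.drop (pos + m + 1) := by
          rw [hl, List.drop_drop]
          have harith : pos + (m + 1) = pos + m + 1 := by omega
          rw [harith]
        have hB := ihQ qc (pos + m + 1)
          (by rcases hqc with h | h <;> (subst h; decide))
          (by omega) (by omega) (by omega)
          (by
            have h1 : pos + m + 1 - 1 = pos + m := by omega
            rw [h1, ← hget m]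
            exact hm)
        rw [hB, ← hdropm, hA]
      -- the slash-first continuation
      have hslashtrue : ∀ (n : Nat), l[n]? = some '/' → Specialless (l.take n) →
          aLoop l false sc false = true := fun n h hsp => aLoop_hit_slash sc h hsp
      -- shared continuation once q has been reduced to pos + mi (the first quote)
      have hfinish : ∀ (mi : Int) (qc : Char), 0 ≤ mi → (qc = '"' ∨ qc = '\'') →
          l[mi.toNat]? = some qc →
          (∀ i, i < mi.toNat → l[i]? ≠ some '"') →
          (∀ i, i < mi.toNat → l[i]? ≠ some '\'') →
          (if (if s = -1 then (-1:Int) else ↑pos + s) ≠ -1 ∧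
              (if s = -1 then (-1:Int) else ↑pos + s) < ↑pos + mi then true
           else
             match expr[((pos : Int) + mi).toNat]? with
             | none => false
             | some quote => bInner expr quote (((pos : Int) + mi).toNat + 1) f)
          = aLoop l false sc false := by
        intro mi qc hmi0 hqc hmq hnbd hnba
        by_cases hslash : (if s = -1 then (-1:Int) else ↑pos + s) ≠ -1 ∧
            (if s = -1 then (-1:Int) else ↑pos + s) < ↑pos + mi
        · rw [if_pos hslash]
          have hs0 : ¬ s = -1 := fun hc => by rw [if_pos hc] at hslash; exact hslash.1 rfl
          have hsmem : '/' ∈ l := by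
            by_contra hc
            exact hs0 (by rw [hs]; exact find_single_neg '/' l hc)
          obtain ⟨h0, h1, h2⟩ := find_single_pos '/' l hsmem
          rw [← hs] at h0 h1 h2
          have hsm : s < mi := by rw [if_neg hs0] at hslash; omega
          rw [hslashtrue s.toNat h1 (specialless_take h2
            (fun i hi => hnbd i (by omega))
            (fun i hi => hnba i (by omega)))]
        · rw [if_neg hslash]
          have hqt : ((pos:Int) + mi).toNat = pos + mi.toNat := by omega
          rw [hqt, ← hget mi.toNat, hmq]
          have hnos : ∀ i, i < mi.toNat → l[i]? ≠ some '/' := by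
            intro i hi hc
            have hsmem : '/' ∈ l := mem_of_getSome hc
            obtain ⟨h0, h1, h2⟩ := find_single_pos '/' l hsmem
            rw [← hs] at h0 h1 h2
            have hs0 : ¬ s = -1 := by omega
            push_neg at hslash
            have hge := hslash (by rw [if_neg hs0]; omega)
            rw [if_neg hs0] at hge
            exact h2 i (by omega) hc
          exact hquote mi.toNat qc hqc hmq (specialless_take hnos hnbd hnba)
      by_cases hdq : d = -1
      all_goals by_cases hsq : a = -1
      · -- no quotes at all: q = -1, B returns (slash ≠ -1)
        have hnd : '"' ∉ l := fun hc => by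
          have := (find_single_pos '"' l hc).1; rw [← hd] at this; omega
        have hna : '\'' ∉ l := fun hc => by
          have := (find_single_pos '\'' l hc).1; rw [← ha] at this; omega
        have hq1 : (if d = -1 then (-1:Int) else ↑pos + d) = -1 := if_pos hdq
        have hq2 : (if a = -1 then (-1:Int) else ↑pos + a) = -1 := if_pos hsq
        simp only [hq1, hq2, reduceIte]
        by_cases hsm : '/' ∈ l
        · obtain ⟨h0, h1, h2⟩ := find_single_pos '/' l hsm
          rw [← hs] at h0 h1 h2
          rw [hslashtrue s.toNat h1 (specialless_take h2
            (fun i hi hc => hnd (mem_of_getSome hc))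
            (fun i hi hc => hna (mem_of_getSome hc)))]
          rw [if_neg (show ¬ s = -1 by omega)]
          exact decide_eq_true (by omega)
        · have hs1 : s = -1 := by rw [hs]; exact find_single_neg '/' l hsm
          rw [aLoop_no_special l sc
            (fun x hx => ⟨fun h => hsm (h ▸ hx), fun h => hnd (h ▸ hx), fun h => hna (h ▸ hx)⟩)]
          simp [hs1]
      · -- only single quotes occur: q = sq
        have hnd : '"' ∉ l := fun hc => by
          have := (find_single_pos '"' l hc).1; rw [← hd] at this; omega
        have hamem : '\'' ∈ l := by
          by_contra hc
          exact hsq (by rw [ha]; exact find_single_neg '\'' l hc)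
        obtain ⟨ha0, ha1, ha2⟩ := find_single_pos '\'' l hamem
        rw [← ha] at ha0 ha1 ha2
        have hq1 : (if d = -1 then (-1:Int) else ↑pos + d) = -1 := if_pos hdq
        have hq2 : (if a = -1 then (-1:Int) else ↑pos + a) = ↑pos + a := if_neg hsq
        simp only [hq1, hq2, reduceIte]
        rw [if_neg (by omega : ¬ ((pos:Int) + a = -1))]
        exact hfinish a '\'' (by omega) (Or.inr rfl) ha1
          (fun i hi hc => hnd (mem_of_getSome hc)) ha2
      · -- only double quotes occur: q = dq
        have hna : '\'' ∉ l := fun hc => by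
          have := (find_single_pos '\'' l hc).1; rw [← ha] at this; omega
        have hdmem : '"' ∈ l := by
          by_contra hc
          exact hdq (by rw [hd]; exact find_single_neg '"' l hc)
        obtain ⟨hd0, hd1, hd2⟩ := find_single_pos '"' l hdmem
        rw [← hd] at hd0 hd1 hd2
        have hq1 : (if d = -1 then (-1:Int) else ↑pos + d) = ↑pos + d := if_neg hdq
        have hq2 : (if a = -1 then (-1:Int) else ↑pos + a) = -1 := if_pos hsq
        simp only [hq1, hq2, reduceIte]
        rw [if_neg (by omega : ¬ ((pos:Int) + d = -1))]
        rw [if_neg (by omega : ¬ ((pos:Int) + d = -1))]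
        exact hfinish d '"' (by omega) (Or.inl rfl) hd1
          hd2 (fun i hi hc => hna (mem_of_getSome hc))
      · -- both kinds of quote occur: q = pos + min d a
        have hdmem : '"' ∈ l := by
          by_contra hc
          exact hdq (by rw [hd]; exact find_single_neg '"' l hc)
        have hamem : '\'' ∈ l := by
          by_contra hc
          exact hsq (by rw [ha]; exact find_single_neg '\'' l hc)
        obtain ⟨hd0, hd1, hd2⟩ := find_single_pos '"' l hdmem
        obtain ⟨ha0, ha1, ha2⟩ := find_single_pos '\'' l hamem
        rw [← hd] at hd0 hd1 hd2
        rw [← ha] at ha0 ha1 ha2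
        have hq1 : (if d = -1 then (-1:Int) else ↑pos + d) = ↑pos + d := if_neg hdq
        have hq2 : (if a = -1 then (-1:Int) else ↑pos + a) = ↑pos + a := if_neg hsq
        simp only [hq1, hq2]
        rw [if_neg (by omega : ¬ ((pos:Int) + d = -1))]
        rw [if_neg (by omega : ¬ ((pos:Int) + a = -1))]
        have hmin : min ((pos:Int) + d) ((pos:Int) + a) = ↑pos + min d a := by omega
        rw [hmin]
        rw [if_neg (by omega : ¬ ((pos:Int) + min d a = -1))]
        by_cases hda : d ≤ a
        · rw [min_eq_left hda]
          exact hfinish d '"' (by omega) (Or.inl rfl) hd1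
            hd2 (fun i hi => ha2 i (by omega))
        · rw [min_eq_right (by omega : a ≤ d)]
          exact hfinish a '\'' (by omega) (Or.inr rfl) ha1
            (fun i hi => hd2 i (by omega)) ha2
    · -- inner loop step
      intro c j hcbs hj1 hj hfuel hprev
      rw [bInner]
      rw [findFrom_single expr c j hj]
      set t := PySem.Chars.find (expr.drop j) [c] with ht
      by_cases htn : t = -1
      · simp only [htn, if_pos]
        have hnc : c ∉ expr.drop j := by
          by_contra hc
          have := (find_single_pos c (expr.drop j) hc).1
          omega
        exact (aLoop_no_close _ _ hnc false).symm
      · have hcm : c ∈ expr.drop j := by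
          by_contra hc
          exact htn (find_single_neg c _ hc)
        obtain ⟨ht0, ht1, ht2⟩ := find_single_pos c (expr.drop j) hcm
        simp only [if_neg htn]
        rw [if_neg (by omega : ¬ ((j : Int) + t = -1))]
        have hka : ((j : Int) + t).toNat = j + t.toNat := by omega
        rw [hka]
        set ka := j + t.toNat with hkadef
        have htlen : t.toNat < (expr.drop j).length := getSome_lt ht1
        have hkalen : ka < expr.length := by
          rw [List.length_drop] at htlen
          omega
        set u := (expr.drop j).take t.toNat with hu
        have hcnu : c ∉ u := by
          intro hc
          rw [hu, List.mem_take_iff_getElem] at hc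
          obtain ⟨i, hi, hieq⟩ := hc
          exact ht2 i (by omega)
            (by rw [List.getElem?_eq_getElem (by omega : i < (expr.drop j).length), hieq])
        have hdecomp : expr.drop j = u ++ c :: expr.drop (ka + 1) := by
          have hthis := decomp_at ht1
          rw [List.drop_drop, ← ht] at hthis
          rw [show j + (t.toNat + 1) = ka + 1 from by omega] at hthis
          rw [hu]
          exact hthis
        -- b = length of the backslash run before ka, computed on the reversed prefix
        have hbcount : bCount expr ka 0 = bsRun ((expr.take ka).reverse) :=
          bCount_eq_bsRun expr ka (by omega) ka 0 (by omega) (by omega)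
            (fun s hs => absurd hs (by omega))
        have htakes : expr.take ka = expr.take j ++ u := by
          rw [hkadef, List.take_add]
        have hrevsplit : (expr.take ka).reverse = u.reverse ++ (expr.take j).reverse := by
          rw [htakes, List.reverse_append]
        have hheadprev : ∀ dd, ((expr.take j).reverse).head? = some dd → dd ≠ '\\' := by
          intro dd hdd
          rw [List.head?_reverse, List.getLast?_eq_getElem?] at hdd
          rw [List.length_take, Nat.min_eq_left hj] at hdd
          rw [List.getElem?_take, if_pos (by omega)] at hdd
          rw [hprev] at hdd
          have hddc : c = dd := (Option.some.injEq _ _).mp hdd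
          rw [← hddc]
          exact hcbs
        have hbsplit : bsRun ((expr.take ka).reverse) = bsRun u.reverse := by
          rw [hrevsplit]
          -- the run cannot cross j: expr[j-1] is the (non-backslash) quote char
          clear hbcount hrevsplit htakes hdecomp
          induction u.reverse with
          | nil =>
            simp only [List.nil_append]
            cases hh : ((expr.take j).reverse).head? with
            | none =>
              have : (expr.take j).reverse = [] := by
                cases hrev : (expr.take j).reverse with
                | nil => rfl
                | cons x xs => rw [hrev] at hh; simp at hh
              rw [this]
            | some dd =>
              have hdd := hheadprev dd hh
              rw [List.head?_eq_some_iff] at hh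
              obtain ⟨ys, hys⟩ := hh
              rw [hys]
              simp [bsRun, hdd]
          | cons x xs ihx =>
            simp only [List.cons_append, bsRun]
            by_cases hx : x = '\\'
            · rw [if_pos hx, if_pos hx, ihx]
            · rw [if_neg hx, if_neg hx]
        rw [hbcount, hbsplit]
        -- A's side: scan the chunk u, then look at the closing candidate
        have hAchunk : aLoop (expr.drop j) true c false
            = aLoop (c :: expr.drop (ka + 1)) true c (escAfter u false) := by
          rw [hdecomp, aLoop_chunk u c hcnu]
        rw [hAchunk, escAfter_parity]
        have hget_ka : expr[ka]? = some c := by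
          have := ht1
          rw [List.getElem?_drop] at this
          rw [hkadef]
          exact this
        by_cases hpar : bsRun u.reverse % 2 = 0
        · rw [if_pos hpar]
          rw [show (decide (bsRun u.reverse % 2 = 1)) = false from by
            simp only [decide_eq_false_iff_not]; omega]
          rw [show aLoop (c :: expr.drop (ka + 1)) true c false
              = aLoop (expr.drop (ka + 1)) false c false by simp [aLoop, hcbs]]
          exact ihP (ka + 1) c (by omega) (by omega)
        · rw [if_neg hpar]
          rw [show (decide (bsRun u.reverse % 2 = 1)) = true from by
            simp only [decide_eq_true_eq]; omega]
          rw [show aLoop (c :: expr.drop (ka + 1)) true c true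
              = aLoop (expr.drop (ka + 1)) true c false by simp [aLoop]]
          exact ihQ c (ka + 1) hcbs (by omega) (by omega) (by omega)
            (by rw [show ka + 1 - 1 = ka by omega]; exact hget_ka)

-- ===== VERDICT (by name: the statement is the Claim_ definition above) =====
theorem expr_has_division_spec : Claim_equal_expr_has_division := by
  intro expr _
  unfold Spec_expr_has_division expr_has_division expr_has_division_alt
  have h := (PQ expr.toList (expr.toList.length + 2)).1 0 ' ' (by omega) (by omega)
  rw [h]
  simp
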